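-- pv_equiv track=rewrite | github.com/lizardnote/Algorithm | 프로그래머스/lv1/12930. 이상한 문자 만들기/이상한 문자 만들기.py | solution
-- ===== SOURCE A (Python) =====
-- def solution(s):
--     answer = ''
--     word = s.split(" ")
--
--     for j in range(len(word)) :
--         for i in range(len(word[j])):
--             answer = answer + word[j][i].upper() if (i%2 == 0) else answer + word[j][i].lower()
--
--         if j != len(word)-1 : answer += ' '
--
--     return answer
-- ===== SOURCE B (Python) =====
-- def solution(s):
--     out = []
--     counter = 0
--     for c in s:
--         if c == ' ':
--             out.append(' ')
--             counter = 0
--         else: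
--             out.append(c.upper() if counter % 2 == 0 else c.lower())
--             counter += 1
--     return ''.join(out)
-- ===== Notes on version B (the rewrite author's own statement) =====
-- stated objective: faster
-- what changed: A splits the string into words and runs nested index loops building the answer by repeated string concatenation with a last-word test; B makes one pass over the characters, keeping a within-word position counter that resets on each space, appending to a list joined once at the end.
import Mathlib
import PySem

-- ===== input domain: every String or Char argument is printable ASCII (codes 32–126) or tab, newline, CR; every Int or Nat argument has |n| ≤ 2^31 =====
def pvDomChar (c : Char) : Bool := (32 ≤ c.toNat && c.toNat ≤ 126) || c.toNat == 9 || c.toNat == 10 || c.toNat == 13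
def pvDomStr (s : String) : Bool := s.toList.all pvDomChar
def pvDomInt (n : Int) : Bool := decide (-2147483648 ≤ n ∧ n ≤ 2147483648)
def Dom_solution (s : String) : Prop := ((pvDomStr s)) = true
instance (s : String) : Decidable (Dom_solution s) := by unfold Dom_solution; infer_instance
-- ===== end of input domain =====

-- B replaces A's split-into-words plus nested index loops with quadratic string concatenation
-- by one linear pass with a within-word position counter reset on spaces (objective: faster, measured).

-- ===== PORT A =====
def solution (s : String) : String :=
  let word := PySem.Chars.splitOn s.toList [' ']
  let answer := (PySem.List.pyRange 0 (PySem.List.len word) 1).foldl (fun answer j =>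
    let w := PySem.List.pyGetD word j []
    let answer := (PySem.List.pyRange 0 (PySem.List.len w) 1).foldl (fun ans i =>
        if PySem.Int.mod i 2 = 0 then ans ++ [PySem.Chars.upperChar (PySem.List.pyGetD w i ' ')]
        else ans ++ [PySem.Chars.lowerChar (PySem.List.pyGetD w i ' ')]) answer
    if j ≠ PySem.List.len word - 1 then answer ++ [' '] else answer) []
  String.mk answer

-- ===== PORT B =====
def solution_alt (s : String) : String :=
  String.mk (s.toList.foldl (fun st c =>
    if c = ' ' then (st.1 ++ [' '], (0 : Int))
    else (st.1 ++ [if PySem.Int.mod st.2 2 = 0 then PySem.Chars.upperChar c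
                   else PySem.Chars.lowerChar c], st.2 + 1))
    ([], 0)).1

-- ===== PRECONDITION & SPEC =====
def Spec_solution (s : String) (out : String) : Prop := out = solution_alt s
instance (s : String) (out : String) : Decidable (Spec_solution s out) := by unfold Spec_solution; infer_instance

-- ===== CLAIM (what is proved, stated in full; the proofs are below) =====
def Claim_equal_solution : Prop := ∀ (s : String), Dom_solution s → Spec_solution s (solution s)

-- ===== LEMMAS AND PROOFS =====

-- structural characterisation of CPython's split(" ") with a one-character separator
def mySplit : List Char → List (List Char)
  | [] => [[]]
  | c :: cs => if c = ' ' then [] :: mySplit cs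
               else match mySplit cs with
                    | [] => [[c]]
                    | h :: t => (c :: h) :: t

def consHead (x : List Char) : List (List Char) → List (List Char)
  | [] => []
  | h :: t => (x ++ h) :: t

theorem mySplit_ne_nil (l : List Char) : mySplit l ≠ [] := by
  cases l with
  | nil => simp [mySplit]
  | cons c cs =>
    simp only [mySplit]
    split
    · simp
    · split <;> simp

theorem go_eq (l : List Char) : ∀ (fuel : Nat) (cur : List Char) (acc : List (List Char)),
    l.length < fuel →
    PySem.Chars.splitOn.go [' '] fuel l cur acc = acc.reverse ++ consHead cur.reverse (mySplit l) := by
  induction l with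
  | nil =>
    intro fuel cur acc h
    match fuel with
    | f + 1 => simp [PySem.Chars.splitOn.go, mySplit, consHead]
  | cons c rest ih =>
    intro fuel cur acc h
    match fuel with
    | f + 1 =>
      rw [PySem.Chars.splitOn.go]
      by_cases hc : c = ' '
      · subst hc
        simp only [List.isPrefixOf, beq_self_eq_true, Bool.and_self, if_pos]
        rw [show List.drop (List.length [' ']) (' ' :: rest) = rest from rfl]
        rw [ih f [] (cur.reverse :: acc) (by simpa using Nat.lt_of_succ_lt_succ h)]
        rcases hms : mySplit rest with _ | ⟨h', t'⟩
        · exact absurd hms (mySplit_ne_nil rest)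
        · simp [mySplit, hms, consHead]
      · rw [if_neg (by simp [List.isPrefixOf]; exact fun e => hc e.symm)]
        rw [ih f (c :: cur) acc (by simpa using Nat.lt_of_succ_lt_succ h)]
        rcases hms : mySplit rest with _ | ⟨h', t'⟩
        · exact absurd hms (mySplit_ne_nil rest)
        · simp [mySplit, hc, hms, consHead]

theorem splitOn_eq (l : List Char) : PySem.Chars.splitOn l [' '] = mySplit l := by
  rw [PySem.Chars.splitOn, go_eq l (l.length + 1) [] [] (Nat.lt_succ_self _)]
  rcases h : mySplit l with _ | ⟨a, b⟩
  · exact absurd h (mySplit_ne_nil l)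
  · simp [consHead]

-- A's per-word conversion starting at within-word index k
def conv : List Char → Int → List Char
  | [], _ => []
  | c :: w, k => (if PySem.Int.mod k 2 = 0 then PySem.Chars.upperChar c
                  else PySem.Chars.lowerChar c) :: conv w (k + 1)

-- the words joined with single spaces (A's outer loop result)
def joinConv : List (List Char) → List Char
  | [] => []
  | w :: t => conv w 0 ++ (if t.isEmpty then [] else ' ' :: joinConv t)

-- B's single-pass result starting at counter k
def g : List Char → Int → List Char
  | [], _ => []
  | c :: cs, k =>
      if c = ' ' then ' ' :: g cs 0
      else (if PySem.Int.mod k 2 = 0 then PySem.Chars.upperChar c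
            else PySem.Chars.lowerChar c) :: g cs (k + 1)

theorem inner_enum (w : List Char) : ∀ (k : Int) (ans : List Char),
    (PySem.List.enumerate w k).foldl (fun ans p =>
        if PySem.Int.mod p.1 2 = 0 then ans ++ [PySem.Chars.upperChar p.2]
        else ans ++ [PySem.Chars.lowerChar p.2]) ans = ans ++ conv w k := by
  induction w with
  | nil => intro k ans; simp [PySem.List.enumerate_nil, conv]
  | cons c w ih =>
    intro k ans
    rw [PySem.List.enumerate_cons, List.foldl_cons, ih]
    simp only [conv]
    split <;> simp

theorem inner_fold (w : List Char) (ans : List Char) :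
    (PySem.List.pyRange 0 (PySem.List.len w) 1).foldl (fun ans i =>
        if PySem.Int.mod i 2 = 0 then ans ++ [PySem.Chars.upperChar (PySem.List.pyGetD w i ' ')]
        else ans ++ [PySem.Chars.lowerChar (PySem.List.pyGetD w i ' ')]) ans = ans ++ conv w 0 := by
  have hmap := PySem.List.enumerate_eq_map_pyRange (xs := w) (d := ' ')
  have := inner_enum w 0 ans
  rw [hmap, List.foldl_map] at this
  exact this

theorem outer_enum (n : Int) : ∀ (ws : List (List Char)) (k : Int) (init : List Char),
    n = k + ws.length →
    (PySem.List.enumerate ws k).foldl (fun answer p =>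
        let answer := answer ++ conv p.2 0
        if p.1 ≠ n - 1 then answer ++ [' '] else answer) init = init ++ joinConv ws := by
  intro ws
  induction ws with
  | nil => intro k init _; simp [PySem.List.enumerate_nil, joinConv]
  | cons w t ih =>
    intro k init hn
    rw [PySem.List.enumerate_cons, List.foldl_cons]
    rcases t with _ | ⟨w', t'⟩
    · have hk : ¬ (k ≠ n - 1) := by simp at hn ⊢; omega
      simp only [hk, if_false]
      rw [ih (k + 1) _ (by simp at hn ⊢; omega)]
      simp [joinConv]
    · have hk : k ≠ n - 1 := by simp at hn; omega
      simp only [hk, if_true, ne_eq, not_false_iff]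
      rw [ih (k + 1) _ (by simp at hn ⊢; omega)]
      simp [joinConv]

theorem solution_char (s : String) :
    solution s = String.mk (joinConv (mySplit s.toList)) := by
  unfold solution
  simp only [inner_fold, splitOn_eq]
  have hmap := PySem.List.enumerate_eq_map_pyRange (xs := mySplit s.toList) (d := ([] : List Char))
  have h := outer_enum (n := (PySem.List.len (mySplit s.toList))) (mySplit s.toList) 0 []
    (by simp [PySem.List.len_eq])
  rw [hmap, List.foldl_map] at h
  simp only [h, List.nil_append]

theorem b_fold (cs : List Char) : ∀ (acc : List Char) (k : Int),
    (cs.foldl (fun st c =>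
      if c = ' ' then (st.1 ++ [' '], (0 : Int))
      else (st.1 ++ [if PySem.Int.mod st.2 2 = 0 then PySem.Chars.upperChar c
                     else PySem.Chars.lowerChar c], st.2 + 1)) (acc, k)).1 = acc ++ g cs k := by
  induction cs with
  | nil => intro acc k; simp [g]
  | cons c cs ih =>
    intro acc k
    by_cases h : c = ' '
    · subst h; simp only [List.foldl_cons, ih, g]; simp
    · simp only [List.foldl_cons, ih, g, h, ite_false]
      by_cases h2 : PySem.Int.mod k 2 = 0 <;> simp

theorem solution_alt_char (s : String) :
    solution_alt s = String.mk (g s.toList 0) := by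
  unfold solution_alt
  rw [b_fold s.toList [] 0]
  simp

-- joinConv of the split, with the first word converted from counter k, is B's single pass
def joinK (cs : List Char) (k : Int) : List Char :=
  match mySplit cs with
  | [] => []
  | h :: t => conv h k ++ (if t.isEmpty then [] else ' ' :: joinConv t)

theorem joinK_eq_g (cs : List Char) : ∀ (k : Int), joinK cs k = g cs k := by
  induction cs with
  | nil => intro k; simp [joinK, mySplit, conv, g]
  | cons c cs ih =>
    intro k
    by_cases h : c = ' '
    · subst h
      have hjoin : joinConv (mySplit cs) = joinK cs 0 := by
        unfold joinK
        rcases hms : mySplit cs with _ | ⟨h', t'⟩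
        · exact absurd hms (mySplit_ne_nil cs)
        · simp [joinConv]
      unfold joinK
      rw [show mySplit (' ' :: cs) = [] :: mySplit cs from by simp [mySplit]]
      simp only [conv, List.nil_append]
      rw [if_neg (by simp only [List.isEmpty_iff]; exact mySplit_ne_nil cs)]
      rw [hjoin, ih 0]
      simp [g]
    · rcases hms : mySplit cs with _ | ⟨h', t'⟩
      · exact absurd hms (mySplit_ne_nil cs)
      · have ihk := ih (k + 1)
        unfold joinK at ihk ⊢
        rw [hms] at ihk
        simp only [mySplit, h, ite_false, hms, g]
        simp only [conv, List.cons_append, ihk]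

theorem joinConv_mySplit (cs : List Char) : joinConv (mySplit cs) = g cs 0 := by
  have := joinK_eq_g cs 0
  unfold joinK at this
  rcases hms : mySplit cs with _ | ⟨h', t'⟩
  · exact absurd hms (mySplit_ne_nil cs)
  · rw [hms] at this; simpa [joinConv] using this

-- ===== VERDICT (by name: the statement is the Claim_ definition above) =====
theorem solution_spec : Claim_equal_solution := by
  intro s _
  unfold Spec_solution
  rw [solution_char, solution_alt_char, joinConv_mySplit]
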